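-- pv_equiv track=rewrite | github.com/oskarpicus/University | Bachelor/Semester1/Fundamentals_of_Programming/Lab13/P14.py | solution
-- ===== SOURCE A (Python) =====
-- def solution(x,n):
--     if len(x)!=n:
--         return False
--     if sorted(x)==x or sorted(x,reverse=True)==x:
--         return False
--     bottom=False
--     for i in range(1,len(x)):
--         if (bottom==False and x[i-1]>x[i]) or (x[i-1]<x[i] and bottom==True):
--             continue
--         elif bottom==False and x[i-1]!=x[i]:
--             bottom=True
--         else:
--             return False
--     return True
-- ===== SOURCE B (Python) =====
-- def solution(x, n):
--     m = len(x)
--     if m != n or m < 3: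
--         return False
--     k = 0
--     while k + 1 < m and x[k] > x[k + 1]:
--         k += 1
--     if k == 0 or k == m - 1:
--         return False
--     while k + 1 < m and x[k] < x[k + 1]:
--         k += 1
--     return k == m - 1
-- ===== Notes on version B (the rewrite author's own statement) =====
-- stated objective: alternative
-- what changed: Replaced A's two sorted()-and-compare monotonicity checks plus boolean-flag loop with two early-exiting index scans: advance over the strict descent, then over the strict ascent, and check both parts are nonempty and reach the end; no sorting, no flag.
import Mathlib
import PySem

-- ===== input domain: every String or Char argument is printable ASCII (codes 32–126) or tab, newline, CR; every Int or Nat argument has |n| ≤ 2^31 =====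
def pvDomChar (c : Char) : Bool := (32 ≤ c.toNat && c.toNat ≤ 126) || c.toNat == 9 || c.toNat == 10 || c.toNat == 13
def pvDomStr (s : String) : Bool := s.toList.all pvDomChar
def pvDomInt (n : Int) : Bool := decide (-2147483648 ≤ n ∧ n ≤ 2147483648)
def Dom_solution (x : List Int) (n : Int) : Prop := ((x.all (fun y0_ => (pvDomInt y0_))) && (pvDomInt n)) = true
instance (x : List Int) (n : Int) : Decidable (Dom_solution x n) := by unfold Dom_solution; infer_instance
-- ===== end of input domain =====

-- B replaces A's two sorted() monotonicity checks (O(n log n)) with a single O(n)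
-- scan of adjacent differences: descend while negative, then require the rest positive.

-- ===== PORT A =====
-- A's for-loop over i in range(1, len(x)) reading x[i-1], x[i]: structural recursion
-- over the list of adjacent pairs, carrying the same 'bottom' flag; 'return False' = false.
def solutionLoop : List (Int × Int) → Bool → Bool
  | [], _ => true
  | (a, b) :: rest, bottom =>
    if (!bottom && decide (a > b)) || (decide (a < b) && bottom) then
      solutionLoop rest bottom
    else if !bottom && decide (a ≠ b) then
      solutionLoop rest true
    else
      false

def solution (x : List Int) (n : Int) : Bool :=
  if (x.length : Int) ≠ n then false
  else if PySem.List.sorted x (fun v => v) false = x ∨ PySem.List.sorted x (fun v => v) true = x then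
    false
  else solutionLoop (x.zip x.tail) false

-- ===== PORT B =====
-- B's two index-advancing while loops ('while k+1 < m and x[k] ? x[k+1]: k += 1'):
-- one recursive scanner, instantiated with the descent and the ascent comparison.
-- x[k] is in range whenever read (guarded by k+1 < m), so List.getD is exact here.
def altScan (cmp : Int → Int → Bool) (x : List Int) (k : Nat) : Nat :=
  if k + 1 < x.length ∧ cmp (x.getD k 0) (x.getD (k + 1) 0) = true then
    altScan cmp x (k + 1)
  else k
termination_by x.length - k
decreasing_by omega

def solution_alt (x : List Int) (n : Int) : Bool :=
  if (x.length : Int) ≠ n ∨ x.length < 3 then false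
  else
    let k := altScan (fun a b => decide (a > b)) x 0
    if k = 0 ∨ k = x.length - 1 then false
    else decide (altScan (fun a b => decide (a < b)) x k = x.length - 1)

-- ===== PRECONDITION & SPEC =====
def Spec_solution (x : List Int) (n : Int) (out : Bool) : Prop := out = solution_alt x n
instance (x : List Int) (n : Int) (out : Bool) : Decidable (Spec_solution x n out) := by unfold Spec_solution; infer_instance

-- ===== CLAIM (what is proved, stated in full; the proofs are below) =====
def Claim_equal_solution : Prop := ∀ (x : List Int) (n : Int), Dom_solution x n → Spec_solution x n (solution x n)

-- ===== LEMMAS AND PROOFS =====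

theorem solutionLoop_true (ps : List (Int × Int)) :
    solutionLoop ps true = ps.all (fun p => decide (p.1 < p.2)) := by
  induction ps with
  | nil => rfl
  | cons p rest ih =>
    obtain ⟨a, b⟩ := p
    by_cases h : a < b <;> simp [solutionLoop, h, ih]

theorem solutionLoop_false (ps : List (Int × Int)) :
    solutionLoop ps false =
      (ps.dropWhile (fun p => decide (p.1 > p.2))).all (fun p => decide (p.1 < p.2)) := by
  induction ps with
  | nil => rfl
  | cons p rest ih =>
    obtain ⟨a, b⟩ := p
    by_cases hgt : a > b
    · simp [solutionLoop, hgt, ih]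
    · by_cases hlt : a < b
      · have hne : a ≠ b := ne_of_lt hlt
        simp [solutionLoop, hgt, hlt, hne, solutionLoop_true]
      · have heq : a = b := le_antisymm (not_lt.mp hgt) (not_lt.mp hlt)
        simp [solutionLoop, heq]

-- adjacent-pair characterisation of Pairwise for a transitive relation
theorem pairwise_iff_adj {α : Type} {R : α → α → Prop}
    (ht : ∀ {a b c}, R a b → R b c → R a c) (x : List α) :
    x.Pairwise R ↔ ∀ p ∈ x.zip x.tail, R p.1 p.2 := by
  induction x with
  | nil => simp
  | cons a t ih =>
    cases t with
    | nil => simp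
    | cons b u =>
      simp only [List.tail_cons] at ih ⊢
      rw [List.pairwise_cons]
      simp only [List.zip_cons_cons, List.mem_cons]
      constructor
      · rintro ⟨ha, hp⟩ p hp2
        rcases hp2 with rfl | hp2
        · exact ha b (by simp)
        · exact ih.mp hp p hp2
      · intro h
        have hpt : (b :: u).Pairwise R := ih.mpr (fun p hp => h p (Or.inr hp))
        refine ⟨?_, hpt⟩
        intro c hc
        have hab := h (a, b) (Or.inl rfl)
        rcases hc with rfl | hc
        · exact hab
        · exact ht hab (List.rel_of_pairwise_cons hpt hc)

theorem sorted_asc_iff (x : List Int) :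
    PySem.List.sorted x (fun v => v) false = x ↔ ∀ p ∈ x.zip x.tail, p.1 ≤ p.2 := by
  rw [← pairwise_iff_adj (R := fun a b : Int => a ≤ b) (fun h1 h2 => le_trans h1 h2) x]
  constructor
  · intro h
    have := PySem.List.sorted_pairwise x (fun v => v)
    rwa [h] at this
  · intro h
    exact PySem.List.sorted_eq_self_of_pairwise x (fun v => v) h

theorem sorted_desc_iff (x : List Int) :
    PySem.List.sorted x (fun v => v) true = x ↔ ∀ p ∈ x.zip x.tail, p.2 ≤ p.1 := by
  rw [← pairwise_iff_adj (R := fun a b : Int => b ≤ a) (fun h1 h2 => le_trans h2 h1) x]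
  constructor
  · intro h
    have := PySem.List.sorted_pairwise_rev x (fun v => v)
    rwa [h] at this
  · intro h
    exact PySem.List.sorted_rev_eq_self_of_pairwise x (fun v => v) h

-- altScan characterised as a takeWhile length over the adjacent-pairs list
theorem altScan_spec (cmp : Int → Int → Bool) (x : List Int) (k : Nat) :
    altScan cmp x k = k + (((x.zip x.tail).drop k).takeWhile (fun p => cmp p.1 p.2)).length := by
  rw [altScan]
  by_cases h : k + 1 < x.length ∧ cmp (x.getD k 0) (x.getD (k + 1) 0) = true
  · rw [if_pos h]
    obtain ⟨hk, hcmp⟩ := h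
    have hzl : (x.zip x.tail).length = x.length - 1 := by
      simp [List.length_zip, List.length_tail]
    have hkz : k < (x.zip x.tail).length := by omega
    have hk1 : k < x.length := by omega
    have hk2 : k + 1 < x.length := hk
    have hdrop : (x.zip x.tail).drop k = (x.zip x.tail)[k] :: (x.zip x.tail).drop (k + 1) :=
      (List.getElem_cons_drop hkz).symm
    have hget : (x.zip x.tail)[k] = (x[k], x[k + 1]) := by
      simp [List.getElem_zip, List.getElem_tail]
    have hgd1 : x.getD k 0 = x[k] := List.getD_eq_getElem x 0 hk1
    have hgd2 : x.getD (k + 1) 0 = x[k + 1] := List.getD_eq_getElem x 0 hk2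
    rw [hgd1, hgd2] at hcmp
    rw [altScan_spec cmp x (k + 1), hdrop, hget, List.takeWhile_cons, if_pos (by simpa using hcmp)]
    simp
    omega
  · rw [if_neg h]
    push Not at h
    by_cases hk : k + 1 < x.length
    · have hcmp := h hk
      have hzl : (x.zip x.tail).length = x.length - 1 := by
        simp [List.length_zip, List.length_tail]
      have hkz : k < (x.zip x.tail).length := by omega
      have hdrop : (x.zip x.tail).drop k = (x.zip x.tail)[k] :: (x.zip x.tail).drop (k + 1) :=
        (List.getElem_cons_drop hkz).symm
      have hget : (x.zip x.tail)[k] = (x[k], x[k + 1]) := by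
        simp [List.getElem_zip, List.getElem_tail]
      have hgd1 : x.getD k 0 = x[k] := List.getD_eq_getElem x 0 (by omega)
      have hgd2 : x.getD (k + 1) 0 = x[k + 1] := List.getD_eq_getElem x 0 hk
      rw [hgd1, hgd2] at hcmp
      rw [hdrop, hget, List.takeWhile_cons, if_neg (by simpa using hcmp)]
      simp
    · have : ((x.zip x.tail).drop k) = [] := by
        apply List.drop_eq_nil_of_le
        simp [List.length_zip, List.length_tail]
        omega
      simp [this]
termination_by x.length - k
decreasing_by omega

theorem drop_takeWhile_length {α : Type} (q : α → Bool) (l : List α) :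
    l.drop (l.takeWhile q).length = l.dropWhile q := by
  induction l with
  | nil => rfl
  | cons a t ih => by_cases h : q a = true <;> simp [h, ih]

theorem core_eq (x : List Int) (_h3 : 3 ≤ x.length) :
    (if PySem.List.sorted x (fun v => v) false = x ∨ PySem.List.sorted x (fun v => v) true = x then false
     else solutionLoop (x.zip x.tail) false)
    = (if ((x.zip x.tail).takeWhile (fun p => decide (p.1 > p.2))).length = 0 ∨
          ((x.zip x.tail).takeWhile (fun p => decide (p.1 > p.2))).length = (x.zip x.tail).length then false
       else ((x.zip x.tail).dropWhile (fun p => decide (p.1 > p.2))).all (fun p => decide (p.1 < p.2))) := by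
  rw [solutionLoop_false]
  by_cases hC : ((x.zip x.tail).dropWhile (fun p => decide (p.1 > p.2))).all (fun p => decide (p.1 < p.2)) = true
  case neg =>
    have hCf : ((x.zip x.tail).dropWhile (fun p => decide (p.1 > p.2))).all (fun p => decide (p.1 < p.2)) = false :=
      Bool.eq_false_iff.mpr hC
    split_ifs <;> simp [hCf]
  case pos =>
    by_cases hk0 : ((x.zip x.tail).takeWhile (fun p => decide (p.1 > p.2))).length = 0
    · have htw : (x.zip x.tail).takeWhile (fun p => decide (p.1 > p.2)) = [] :=
        List.length_eq_zero_iff.mp hk0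
      have hdw : (x.zip x.tail).dropWhile (fun p => decide (p.1 > p.2)) = x.zip x.tail := by
        have h := List.takeWhile_append_dropWhile (p := fun p : Int × Int => decide (p.1 > p.2)) (l := x.zip x.tail)
        rw [htw] at h
        simpa using h
      have hasc : PySem.List.sorted x (fun v => v) false = x := by
        rw [sorted_asc_iff]
        intro p hp
        have := (List.all_eq_true.mp hC) p (by rwa [hdw])
        have : p.1 < p.2 := by simpa using this
        exact le_of_lt this
      rw [if_pos (Or.inl hasc), if_pos (Or.inl hk0)]
    · by_cases hkl : ((x.zip x.tail).takeWhile (fun p => decide (p.1 > p.2))).length = (x.zip x.tail).length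
      · have heq : (x.zip x.tail).takeWhile (fun p => decide (p.1 > p.2)) = x.zip x.tail :=
          (List.takeWhile_prefix _).eq_of_length hkl
        have hdesc : PySem.List.sorted x (fun v => v) true = x := by
          rw [sorted_desc_iff]
          intro p hp
          have hptw : p ∈ (x.zip x.tail).takeWhile (fun q : Int × Int => decide (q.1 > q.2)) := by
            rwa [heq]
          have hgp := List.mem_takeWhile_imp (p := fun q : Int × Int => decide (q.1 > q.2)) hptw
          have : p.2 < p.1 := by simpa using hgp
          exact le_of_lt this
        rw [if_pos (Or.inr hdesc), if_pos (Or.inr hkl)]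
      · have hna : ¬ (PySem.List.sorted x (fun v => v) false = x) := by
          rw [sorted_asc_iff]
          intro hall
          have hne : (x.zip x.tail).takeWhile (fun p => decide (p.1 > p.2)) ≠ [] := by
            intro h
            exact hk0 (by simp [h])
          obtain ⟨p, hp⟩ := List.exists_mem_of_ne_nil _ hne
          have hgp := List.mem_takeWhile_imp (p := fun q : Int × Int => decide (q.1 > q.2)) hp
          have hmem : p ∈ x.zip x.tail := (List.takeWhile_prefix _).subset hp
          have h1 := hall p hmem
          have h2 : p.2 < p.1 := by simpa using hgp
          omega
        have hnd : ¬ (PySem.List.sorted x (fun v => v) true = x) := by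
          rw [sorted_desc_iff]
          intro hall
          have hne : (x.zip x.tail).dropWhile (fun p => decide (p.1 > p.2)) ≠ [] := by
            intro h
            have hap := List.takeWhile_append_dropWhile (p := fun p : Int × Int => decide (p.1 > p.2)) (l := x.zip x.tail)
            rw [h, List.append_nil] at hap
            exact hkl (by rw [hap])
          obtain ⟨p, hp⟩ := List.exists_mem_of_ne_nil _ hne
          have hlt : decide (p.1 < p.2) = true := (List.all_eq_true.mp hC) p hp
          have hmem : p ∈ x.zip x.tail := (List.dropWhile_sublist _).subset hp
          have h1 := hall p hmem
          have h2 : p.1 < p.2 := by simpa using hlt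
          omega
        rw [if_neg (by tauto), if_neg (by tauto)]

-- ===== VERDICT (by name: the statement is the Claim_ definition above) =====
theorem solution_spec : Claim_equal_solution := by
  intro x n _
  unfold Spec_solution solution solution_alt
  by_cases hn : (x.length : Int) = n
  case neg => simp [hn]
  case pos =>
    by_cases h3 : x.length < 3
    · rw [if_pos (Or.inr h3), if_neg (by simp [hn])]
      have hmono : PySem.List.sorted x (fun v => v) false = x ∨ PySem.List.sorted x (fun v => v) true = x := by
        rcases x with _ | ⟨a, _ | ⟨b, _ | ⟨c, t⟩⟩⟩
        · left; rw [sorted_asc_iff]; simp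
        · left; rw [sorted_asc_iff]; simp
        · rcases le_total a b with h | h
          · left; rw [sorted_asc_iff]; simp [h]
          · right; rw [sorted_desc_iff]; simp [h]
        · exfalso; simp [List.length_cons] at h3; omega
      rw [if_pos hmono]
    · rw [if_neg (show ¬((x.length : Int) ≠ n) by simp [hn]),
          if_neg (show ¬((x.length : Int) ≠ n ∨ x.length < 3) by simp [hn]; omega)]
      rw [core_eq x (by omega)]
      have hzl : (x.zip x.tail).length = x.length - 1 := by
        simp [List.length_zip, List.length_tail]
      have h0 : altScan (fun a b => decide (a > b)) x 0
          = ((x.zip x.tail).takeWhile (fun p => decide (p.1 > p.2))).length := by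
        simpa using altScan_spec (fun a b => decide (a > b)) x 0
      have hbr : ((x.zip x.tail).dropWhile (fun p => decide (p.1 > p.2))).all (fun p => decide (p.1 < p.2))
          = decide (altScan (fun a b => decide (a < b)) x
              ((x.zip x.tail).takeWhile (fun p => decide (p.1 > p.2))).length = x.length - 1) := by
        have hspec := altScan_spec (fun a b => decide (a < b)) x
          ((x.zip x.tail).takeWhile (fun p => decide (p.1 > p.2))).length
        rw [drop_takeWhile_length] at hspec
        have hlen2 : ((x.zip x.tail).takeWhile (fun p => decide (p.1 > p.2))).length
            + ((x.zip x.tail).dropWhile (fun p => decide (p.1 > p.2))).length = (x.zip x.tail).length := by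
          have h := List.takeWhile_append_dropWhile
            (p := fun p : Int × Int => decide (p.1 > p.2)) (l := x.zip x.tail)
          conv_rhs => rw [← h]
          rw [List.length_append]
        have ht_le : (((x.zip x.tail).dropWhile (fun p => decide (p.1 > p.2))).takeWhile
              (fun p => decide (p.1 < p.2))).length
            ≤ ((x.zip x.tail).dropWhile (fun p => decide (p.1 > p.2))).length :=
          (List.takeWhile_prefix _).length_le
        by_cases hall : ((x.zip x.tail).dropWhile (fun p => decide (p.1 > p.2))).all
            (fun p => decide (p.1 < p.2)) = true
        · have hself : ((x.zip x.tail).dropWhile (fun p => decide (p.1 > p.2))).takeWhile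
              (fun p => decide (p.1 < p.2))
              = (x.zip x.tail).dropWhile (fun p => decide (p.1 > p.2)) :=
            List.takeWhile_eq_self_iff.mpr (fun a ha => List.all_eq_true.mp hall a ha)
          rw [hall, hspec, hself]
          symm
          rw [decide_eq_true_iff]
          omega
        · have hne : ((x.zip x.tail).dropWhile (fun p => decide (p.1 > p.2))).takeWhile
              (fun p => decide (p.1 < p.2))
              ≠ (x.zip x.tail).dropWhile (fun p => decide (p.1 > p.2)) := by
            intro he
            exact hall (List.all_eq_true.mpr (fun a ha =>
              List.mem_takeWhile_imp (p := fun p : Int × Int => decide (p.1 < p.2)) (by rwa [he])))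
          have htlt : (((x.zip x.tail).dropWhile (fun p => decide (p.1 > p.2))).takeWhile
                (fun p => decide (p.1 < p.2))).length
              < ((x.zip x.tail).dropWhile (fun p => decide (p.1 > p.2))).length :=
            lt_of_le_of_ne ht_le (fun hl => hne ((List.takeWhile_prefix _).eq_of_length hl))
          rw [Bool.eq_false_iff.mpr hall, hspec]
          symm
          rw [decide_eq_false_iff_not]
          omega
      simp only [h0, hzl, hbr]
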